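-- pv_equiv track=rewrite | github.com/woee3/algorithm | programers/87946_피로도.py | solution
-- ===== SOURCE A (Python) =====
-- from itertools import permutations
--
-- def solution(k, dungeons):
--     answer = 0
--     num = [i for i in range(len(dungeons))]
--     per = list(permutations(num, len(num)))
--     for p in per:
--         temp = k
--         ans = 0
--         for i in p:
--             if temp >= dungeons[i][0] and temp >= dungeons[i][1]:
--                 temp -= dungeons[i][1]
--                 ans += 1
--             else:
--                 break
--         answer = max(answer, ans)
--         if answer == len(dungeons):
--             break
--     return answer
-- ===== SOURCE B (Python) =====
-- def solution(k, dungeons):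
--     # Pruned DFS over the multiset of remaining dungeons (instead of
--     # enumerating every full permutation): recurse only along feasible
--     # prefixes, stop as soon as every remaining dungeon was cleared.
--     def dfs(temp, remaining):
--         best = 0
--         for idx in range(len(remaining)):
--             req, cost = remaining[idx]
--             if temp >= req and temp >= cost:
--                 r = 1 + dfs(temp - cost, remaining[:idx] + remaining[idx + 1:])
--                 if r > best:
--                     best = r
--                     if best == len(remaining):
--                         break
--         return best
--     return dfs(k, [(d[0], d[1]) for d in dungeons])
-- ===== Notes on version B (the rewrite author's own statement) =====
-- stated objective: alternative
-- what changed: A materialises all n! permutations and scores each one's clearable prefix; B does a depth-first search over the remaining dungeons that recurses only along feasible prefixes and stops once every remaining dungeon is cleared, so infeasible orderings are pruned instead of enumerated.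
-- outside the precondition, e.g. on solution(0, [[5]]): A returns 0, B raises IndexError
import Mathlib
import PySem

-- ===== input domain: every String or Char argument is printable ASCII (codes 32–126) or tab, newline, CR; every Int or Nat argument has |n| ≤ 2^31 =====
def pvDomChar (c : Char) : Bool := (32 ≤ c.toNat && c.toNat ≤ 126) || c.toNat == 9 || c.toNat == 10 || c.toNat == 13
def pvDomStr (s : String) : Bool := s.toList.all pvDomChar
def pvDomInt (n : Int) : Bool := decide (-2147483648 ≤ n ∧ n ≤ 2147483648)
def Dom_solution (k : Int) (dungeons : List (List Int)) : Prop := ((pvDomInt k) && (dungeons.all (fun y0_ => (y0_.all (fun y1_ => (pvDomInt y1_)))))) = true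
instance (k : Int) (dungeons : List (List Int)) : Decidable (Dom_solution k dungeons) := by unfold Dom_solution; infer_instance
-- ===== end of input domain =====

-- B replaces A's exhaustive scan of all n! permutations by a pruned DFS over the
-- remaining dungeons (recursing only along feasible prefixes, stopping at a full
-- clear); a structurally different search of the same worst-case cost.


-- ===== PORT A =====
-- all ways to pick one element of a list, paired with the rest:
-- (picks l)[i] = (l[i], l[:i] + l[i+1:])
def picks {α : Type} : List α → List (α × List α)
  | [] => []
  | x :: xs => (x, xs) :: (picks xs).map (fun p => (p.1, x :: p.2))

-- itertools.permutations(num, len(num)): pick each element in order as head, then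
-- recurse on the rest; fuel = length of the list makes the recursion structural
def permsAux {α : Type} : Nat → List α → List (List α)
  | 0, _ => [[]]
  | fuel + 1, l => (picks l).flatMap (fun p => (permsAux fuel p.2).map (fun q => p.1 :: q))

-- A's inner loop over one permutation p: count of the cleared prefix (break on failure)
def runPrefix (dungeons : List (List Int)) (temp : Int) : List Int → Int
  | [] => 0
  | i :: rest =>
    let row := (PySem.List.pyGet? dungeons i).getD []
    if temp ≥ (PySem.List.pyGet? row 0).getD 0 ∧ temp ≥ (PySem.List.pyGet? row 1).getD 0 then
      1 + runPrefix dungeons (temp - (PySem.List.pyGet? row 1).getD 0) rest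
    else 0

-- A's outer loop with its early break when answer == len(dungeons)
def outerA (n : Int) (dungeons : List (List Int)) (k : Int) : List (List Int) → Int → Int
  | [], answer => answer
  | p :: ps, answer =>
    let ans := runPrefix dungeons k p
    let answer' := max answer ans
    if answer' = n then answer' else outerA n dungeons k ps answer'

def solution (k : Int) (dungeons : List (List Int)) : Int :=
  let num : List Int := (List.range dungeons.length).map (fun i : Nat => (i : Int))
  let per := permsAux num.length num
  outerA (dungeons.length : Int) dungeons k per 0

-- ===== PORT B =====
-- Source B's dfs: loop over the positions of `remaining` (element + rest = picks),
-- recurse on feasible choices, break once best == len(remaining).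
-- fuel = len(remaining) makes the recursion structural.
-- B's own pick helper: (choices l)[idx] = (l[idx], l[:idx] + l[idx+1:])
def choices : List (Int × Int) → List ((Int × Int) × List (Int × Int))
  | [] => []
  | x :: xs => (x, xs) :: (choices xs).map (fun p => (p.1, x :: p.2))

-- Source B's inner for-loop: one pass over (element, rest-of-remaining) choices with the
-- break once best == len(remaining); `recurse` is the recursive dfs call (passed in so
-- that both functions are plain structural recursions)
def dfsLoop (recurse : Int → List (Int × Int) → Int) (temp n : Int) :
    List ((Int × Int) × List (Int × Int)) → Int → Int
  | [], best => best
  | (d, rest) :: tl, best =>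
    if temp ≥ d.1 ∧ temp ≥ d.2 then
      let r := 1 + recurse (temp - d.2) rest
      if best < r then
        if r = n then r else dfsLoop recurse temp n tl r
      else dfsLoop recurse temp n tl best
    else dfsLoop recurse temp n tl best

-- Source B's dfs: fuel = len(remaining) makes the recursion structural
def dfsAux : Nat → Int → List (Int × Int) → Int
  | 0, _, _ => 0
  | fuel + 1, temp, rem => dfsLoop (fun t r => dfsAux fuel t r) temp (rem.length : Int) (choices rem) 0

def solution_alt (k : Int) (dungeons : List (List Int)) : Int :=
  let pairs := dungeons.map (fun d => ((PySem.List.pyGet? d 0).getD 0, (PySem.List.pyGet? d 1).getD 0))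
  dfsAux pairs.length k pairs

-- ===== PRECONDITION & SPEC =====
-- Pre_ excludes dungeons containing a row with fewer than two entries: there A raises
-- IndexError (except when the short-circuit `and` happens to skip the missing cost,
-- where A returns) while B's tuple conversion raises IndexError.
def Pre_solution (k : Int) (dungeons : List (List Int)) : Prop := ∀ d ∈ dungeons, 2 ≤ d.length
instance (k : Int) (dungeons : List (List Int)) : Decidable (Pre_solution k dungeons) := by unfold Pre_solution; infer_instance
def pvWitness_solution : Int × List (List Int) := (80, [[80, 20], [50, 40], [30, 10]])

def Spec_solution (k : Int) (dungeons : List (List Int)) (out : Int) : Prop := out = solution_alt k dungeons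
instance (k : Int) (dungeons : List (List Int)) (out : Int) : Decidable (Spec_solution k dungeons out) := by unfold Spec_solution; infer_instance

-- ===== CLAIM (what is proved, stated in full; the proofs are below) =====
def Claim_equal_solution : Prop := ∀ (k : Int) (dungeons : List (List Int)), Dom_solution k dungeons → Pre_solution k dungeons → Spec_solution k dungeons (solution k dungeons)

-- ===== LEMMAS AND PROOFS =====

-- max of a list of ints, floored at 0
def intMax (l : List Int) : Int := l.foldr max 0

theorem intMax_nil : intMax [] = 0 := rfl
theorem intMax_cons (x : Int) (l : List Int) : intMax (x :: l) = max x (intMax l) := rfl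

theorem intMax_nonneg (l : List Int) : 0 ≤ intMax l := by
  induction l with
  | nil => simp [intMax]
  | cons x l ih => simp only [intMax_cons, le_max_iff]; right; exact ih

theorem intMax_le {l : List Int} {c : Int} (h : ∀ x ∈ l, x ≤ c) (hc : 0 ≤ c) : intMax l ≤ c := by
  induction l with
  | nil => simpa [intMax]
  | cons x l ih =>
    simp [intMax_cons]
    exact ⟨h x (by simp), ih (fun y hy => h y (by simp [hy]))⟩

theorem intMax_append (a b : List Int) : intMax (a ++ b) = max (intMax a) (intMax b) := by
  induction a with
  | nil => simp only [List.nil_append, intMax_nil]; exact (max_eq_right (intMax_nonneg b)).symm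
  | cons x a ih => simp [intMax_cons, ih, max_assoc]

theorem intMax_flatMap {α : Type} (l : List α) (g : α → List Int) :
    intMax (l.flatMap g) = intMax (l.map (fun x => intMax (g x))) := by
  induction l with
  | nil => simp [intMax]
  | cons x l ih => simp [List.flatMap_cons, intMax_append, intMax_cons, ih]

theorem intMax_map_add_one {α : Type} (l : List α) (f : α → Int) (hne : l ≠ [])
    (hnn : ∀ x ∈ l, 0 ≤ f x) :
    intMax (l.map (fun x => 1 + f x)) = 1 + intMax (l.map f) := by
  induction l with
  | nil => simp at hne
  | cons x l ih =>
    rcases l with _ | ⟨y, l⟩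
    · simp [intMax]
      have := hnn x (by simp); omega
    · have h1 := ih (by simp) (fun z hz => hnn z (by simp at hz ⊢; tauto))
      simp only [List.map_cons, intMax_cons] at h1 ⊢
      omega

theorem intMax_map_zero {α : Type} (l : List α) : intMax (l.map (fun _ => (0 : Int))) = 0 := by
  induction l with
  | nil => rfl
  | cons x l ih => simp only [List.map_cons, intMax_cons, ih]; omega

-- picks facts
theorem choices_eq_picks : ∀ (l : List (Int × Int)), choices l = picks l
  | [] => rfl
  | x :: xs => by simp [choices, picks, choices_eq_picks xs]

theorem picks_mem_length {α : Type} {l : List α} {p : α × List α} (h : p ∈ picks l) :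
    p.2.length + 1 = l.length := by
  induction l generalizing p with
  | nil => simp [picks] at h
  | cons x xs ih =>
    simp [picks] at h
    rcases h with h | ⟨q, r, hq, rfl⟩
    · subst h; simp
    · have := ih hq; simp at this ⊢; omega

theorem picks_map {α β : Type} (f : α → β) (l : List α) :
    picks (l.map f) = (picks l).map (fun p => (f p.1, p.2.map f)) := by
  induction l with
  | nil => rfl
  | cons x xs ih => simp [picks, ih, List.map_map]

-- permsAux facts
theorem permsAux_ne_nil : ∀ (fuel : Nat) (l : List (Int × Int)), l.length = fuel → permsAux fuel l ≠ []
  | 0, _, _ => by simp [permsAux]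
  | fuel + 1, l, h => by
    rcases l with _ | ⟨x, xs⟩
    · simp at h
    · simp only [permsAux, picks, ne_eq, List.flatMap_eq_nil_iff]
      intro hall
      have := hall (x, xs) (by simp)
      simp [permsAux_ne_nil fuel xs (by simpa using h)] at this

theorem permsAux_length {α : Type} : ∀ (fuel : Nat) (l : List α), l.length = fuel →
    ∀ p ∈ permsAux fuel l, p.length = fuel
  | 0, _, _ => by simp [permsAux]
  | fuel + 1, l, h => by
    intro p hp
    simp only [permsAux, List.mem_flatMap] at hp
    obtain ⟨q, hq, hp⟩ := hp
    simp only [List.mem_map] at hp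
    obtain ⟨p', hp', rfl⟩ := hp
    have hlen := picks_mem_length hq
    have := permsAux_length fuel q.2 (by omega) p' hp'
    simp [this]

theorem permsAux_map {α β : Type} (f : α → β) :
    ∀ (fuel : Nat) (l : List α), permsAux fuel (l.map f) = (permsAux fuel l).map (List.map f)
  | 0, l => by simp [permsAux]
  | fuel + 1, l => by
    simp only [permsAux, picks_map, List.flatMap_map, List.map_flatMap]
    apply List.flatMap_congr (fun p _ => ?_)
    simp [permsAux_map f fuel p.2, List.map_map, Function.comp_def]

-- runs
def runPair (temp : Int) : List (Int × Int) → Int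
  | [] => 0
  | d :: rest => if temp ≥ d.1 ∧ temp ≥ d.2 then 1 + runPair (temp - d.2) rest else 0

def toPair (dungeons : List (List Int)) (i : Int) : Int × Int :=
  let row := (PySem.List.pyGet? dungeons i).getD []
  ((PySem.List.pyGet? row 0).getD 0, (PySem.List.pyGet? row 1).getD 0)

theorem runPrefix_eq (dungeons : List (List Int)) :
    ∀ (p : List Int) (temp : Int), runPrefix dungeons temp p = runPair temp (p.map (toPair dungeons)) := by
  intro p
  induction p with
  | nil => intro temp; rfl
  | cons i rest ih => intro temp; simp [runPrefix, runPair, toPair, ih]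

theorem runPair_nonneg : ∀ (temp : Int) (p : List (Int × Int)), 0 ≤ runPair temp p
  | _, [] => le_refl 0
  | temp, d :: rest => by
    simp only [runPair]
    split
    · have := runPair_nonneg (temp - d.2) rest; omega
    · omega

theorem runPair_le_length : ∀ (temp : Int) (p : List (Int × Int)), runPair temp p ≤ p.length
  | _, [] => by simp [runPair]
  | temp, d :: rest => by
    simp only [runPair]
    split
    · have := runPair_le_length (temp - d.2) rest; simp; omega
    · simp; omega

-- break elimination for A's outer loop
theorem outerA_elim (n : Int) (dungeons : List (List Int)) (k : Int) :
    ∀ (ps : List (List Int)) (answer : Int), 0 ≤ answer → answer ≤ n →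
      (∀ p ∈ ps, runPrefix dungeons k p ≤ n) →
      outerA n dungeons k ps answer = max answer (intMax (ps.map (runPrefix dungeons k))) := by
  intro ps
  induction ps with
  | nil =>
    intro answer h0 _ _
    simp only [outerA, List.map_nil, intMax_nil]
    exact (max_eq_left h0).symm
  | cons p ps ih =>
    intro answer h0 hle hall
    simp only [outerA, List.map_cons, intMax_cons]
    by_cases heq : max answer (runPrefix dungeons k p) = n
    · rw [if_pos heq]
      have hn0 : 0 ≤ n := le_trans (le_trans h0 (le_max_left _ _)) (le_of_eq heq)
      have hX : intMax (ps.map (runPrefix dungeons k)) ≤ n := by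
        apply intMax_le _ hn0
        intro x hx
        obtain ⟨q, hq, rfl⟩ := List.mem_map.mp hx
        exact hall q (by simp [hq])
      rw [← max_assoc, heq, max_eq_left hX]
    · rw [if_neg heq]
      rw [ih (max answer (runPrefix dungeons k p))
            (le_trans h0 (le_max_left _ _))
            (max_le hle (hall p (by simp)))
            (fun q hq => hall q (by simp [hq]))]
      rw [max_assoc]

-- master lemma: bounds + characterization + equality with the permutation max
theorem dfsLoop_elim (fuel : Nat) (temp n : Int)
    (hb : ∀ (t : Int) (r : List (Int × Int)), r.length = fuel → 0 ≤ dfsAux fuel t r ∧ dfsAux fuel t r ≤ fuel) :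
    ∀ (l : List ((Int × Int) × List (Int × Int))) (best : Int), 0 ≤ best → best ≤ n →
      (∀ p ∈ l, p.2.length = fuel ∧ (fuel : Int) + 1 ≤ n) →
      dfsLoop (fun t r => dfsAux fuel t r) temp n l best =
        max best (intMax (l.map (fun p => if temp ≥ p.1.1 ∧ temp ≥ p.1.2 then 1 + dfsAux fuel (temp - p.1.2) p.2 else 0))) := by
  intro l
  induction l with
  | nil =>
    intro best h0 _ _
    simp only [dfsLoop, List.map_nil, intMax_nil]
    exact (max_eq_left h0).symm
  | cons p tl ih =>
    intro best h0 hbn hall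
    obtain ⟨d, rest⟩ := p
    have hrest : rest.length = fuel := (hall (d, rest) (by simp)).1
    have hfn : (fuel : Int) + 1 ≤ n := (hall (d, rest) (by simp)).2
    have htl : ∀ q ∈ tl, q.2.length = fuel ∧ (fuel : Int) + 1 ≤ n := fun q hq => hall q (by simp [hq])
    have hn0 : 0 ≤ n := le_trans h0 hbn
    have hX0 : 0 ≤ intMax (tl.map (fun p => if temp ≥ p.1.1 ∧ temp ≥ p.1.2 then 1 + dfsAux fuel (temp - p.1.2) p.2 else 0)) := intMax_nonneg _
    have hXn : intMax (tl.map (fun p => if temp ≥ p.1.1 ∧ temp ≥ p.1.2 then 1 + dfsAux fuel (temp - p.1.2) p.2 else 0)) ≤ n := by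
      apply intMax_le _ hn0
      intro x hx
      obtain ⟨q, hq, rfl⟩ := List.mem_map.mp hx
      by_cases hc : temp ≥ q.1.1 ∧ temp ≥ q.1.2
      · rw [if_pos hc]
        have := (hb (temp - q.1.2) q.2 (htl q hq).1).2
        omega
      · rw [if_neg hc]; exact hn0
    simp only [dfsLoop, List.map_cons, intMax_cons]
    by_cases hc : temp ≥ d.1 ∧ temp ≥ d.2
    · rw [if_pos hc, if_pos hc]
      have hd := hb (temp - d.2) rest hrest
      by_cases hbr : best < 1 + dfsAux fuel (temp - d.2) rest
      · rw [if_pos hbr]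
        by_cases hrn : 1 + dfsAux fuel (temp - d.2) rest = n
        · rw [if_pos hrn]
          rw [max_eq_left (le_trans hXn (le_of_eq hrn.symm)), max_eq_right (le_of_lt hbr)]
        · rw [if_neg hrn]
          rw [ih (1 + dfsAux fuel (temp - d.2) rest) (by omega) (by omega) htl]
          exact (max_eq_right (le_trans (le_of_lt hbr) (le_max_left _ _))).symm
      · rw [if_neg hbr]
        rw [ih best h0 hbn htl]
        simp only [max_def]
        split_ifs <;> omega
    · rw [if_neg hc, if_neg hc]
      rw [ih best h0 hbn htl, max_eq_right hX0]

theorem dfs_master : ∀ (fuel : Nat) (temp : Int) (rem : List (Int × Int)), rem.length = fuel →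
    (0 ≤ dfsAux fuel temp rem ∧ dfsAux fuel temp rem ≤ fuel) ∧
    intMax ((permsAux fuel rem).map (runPair temp)) = dfsAux fuel temp rem
  | 0, temp, rem, hlen => by
    have : rem = [] := List.length_eq_zero_iff.mp hlen
    subst this
    refine ⟨⟨by simp [dfsAux], by simp [dfsAux]⟩, ?_⟩
    simp [permsAux, dfsAux, runPair, intMax]
  | fuel + 1, temp, rem, hlen => by
    have hb : ∀ (t : Int) (r : List (Int × Int)), r.length = fuel → 0 ≤ dfsAux fuel t r ∧ dfsAux fuel t r ≤ fuel :=
      fun t r h => (dfs_master fuel t r h).1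
    have hchar : dfsAux (fuel + 1) temp rem =
        intMax ((picks rem).map (fun p => if temp ≥ p.1.1 ∧ temp ≥ p.1.2 then 1 + dfsAux fuel (temp - p.1.2) p.2 else 0)) := by
      simp only [dfsAux, choices_eq_picks]
      rw [dfsLoop_elim fuel temp (rem.length : Int) hb (picks rem) 0 (le_refl 0) (by positivity)
            (fun p hp => ⟨by have := picks_mem_length hp; omega, by rw [hlen]; push_cast; omega⟩)]
      exact max_eq_right (intMax_nonneg _)
    have hub : dfsAux (fuel + 1) temp rem ≤ (fuel + 1 : Nat) := by
      rw [hchar]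
      apply intMax_le _ (by positivity)
      intro x hx
      obtain ⟨q, hq, rfl⟩ := List.mem_map.mp hx
      by_cases hc : temp ≥ q.1.1 ∧ temp ≥ q.1.2
      · rw [if_pos hc]
        have hql : q.2.length = fuel := by have := picks_mem_length hq; omega
        have := (hb (temp - q.1.2) q.2 hql).2
        push_cast; omega
      · rw [if_neg hc]; positivity
    have h0 : 0 ≤ dfsAux (fuel + 1) temp rem := by rw [hchar]; exact intMax_nonneg _
    refine ⟨⟨h0, hub⟩, ?_⟩
    rw [hchar]
    simp only [permsAux, List.map_flatMap, intMax_flatMap]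
    apply congrArg
    apply List.map_congr_left
    intro p hp
    have hpl : p.2.length = fuel := by have := picks_mem_length hp; omega
    have hmm : ((permsAux fuel p.2).map (fun q => p.1 :: q)).map (runPair temp)
        = (permsAux fuel p.2).map (fun q => if temp ≥ p.1.1 ∧ temp ≥ p.1.2 then 1 + runPair (temp - p.1.2) q else 0) := by
      rw [List.map_map]; rfl
    rw [hmm]
    by_cases hc : temp ≥ p.1.1 ∧ temp ≥ p.1.2
    · simp only [if_pos hc]
      rw [intMax_map_add_one (permsAux fuel p.2) (runPair (temp - p.1.2))
            (permsAux_ne_nil fuel p.2 hpl) (fun q _ => runPair_nonneg (temp - p.1.2) q)]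
      rw [(dfs_master fuel (temp - p.1.2) p.2 hpl).2]
    · simp only [if_neg hc]
      exact intMax_map_zero _

theorem map_toPair (dungeons : List (List Int)) :
    ((List.range dungeons.length).map (fun i : Nat => (i : Int))).map (toPair dungeons)
      = dungeons.map (fun d => ((PySem.List.pyGet? d 0).getD 0, (PySem.List.pyGet? d 1).getD 0)) := by
  apply List.ext_getElem (by simp)
  intro i h1 h2
  rw [List.getElem_map, List.getElem_map, List.getElem_range]
  have hi2 : i < dungeons.length := by simpa using h2
  have hi : PySem.List.pyGet? dungeons ((i : Nat) : Int) = some dungeons[i] := by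
    rw [PySem.List.pyGet?_natCast, List.getElem?_eq_getElem hi2]
  simp only [toPair, hi, Option.getD_some, List.getElem_map]

theorem solution_eq (k : Int) (dungeons : List (List Int)) : solution k dungeons = solution_alt k dungeons := by
  have h1 : solution k dungeons
      = outerA (dungeons.length : Int) dungeons k
          (permsAux dungeons.length ((List.range dungeons.length).map (fun i : Nat => (i : Int)))) 0 := by
    simp [solution]
  have hall : ∀ p ∈ permsAux dungeons.length ((List.range dungeons.length).map (fun i : Nat => (i : Int))),
      runPrefix dungeons k p ≤ (dungeons.length : Int) := by
    intro p hp
    have hlen := permsAux_length dungeons.length _ (by simp) p hp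
    calc runPrefix dungeons k p = runPair k (p.map (toPair dungeons)) := runPrefix_eq dungeons p k
      _ ≤ ((p.map (toPair dungeons)).length : Int) := runPair_le_length _ _
      _ = (dungeons.length : Int) := by simp [hlen]
  rw [h1, outerA_elim _ _ _ _ 0 (le_refl 0) (by positivity) hall, max_eq_right (intMax_nonneg _)]
  have hmap : (permsAux dungeons.length ((List.range dungeons.length).map (fun i : Nat => (i : Int)))).map (runPrefix dungeons k)
      = ((permsAux dungeons.length ((List.range dungeons.length).map (fun i : Nat => (i : Int)))).map (List.map (toPair dungeons))).map (runPair k) := by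
    rw [List.map_map]
    apply List.map_congr_left
    intro p _
    exact runPrefix_eq dungeons p k
  rw [hmap, ← permsAux_map (toPair dungeons) dungeons.length, map_toPair]
  have h2 : solution_alt k dungeons
      = dfsAux dungeons.length k (dungeons.map (fun d => ((PySem.List.pyGet? d 0).getD 0, (PySem.List.pyGet? d 1).getD 0))) := by
    simp [solution_alt]
  rw [h2]
  exact (dfs_master dungeons.length k _ (by simp)).2

-- ===== VERDICT (by name: the statement is the Claim_ definition above) =====
theorem solution_spec : Claim_equal_solution := by
  intro k dungeons _ _
  exact solution_eq k dungeons
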